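-- pv_equiv track=rewrite | github.com/SyeonPark24/Coding-Test-Study | 프로그래머스/1/87389. 나머지가 1이 되는 수 찾기/나머지가 1이 되는 수 찾기.py | solution
-- ===== SOURCE A (Python) =====
-- def solution(n):
--     list_a = []
--
--
--     for i in range(1, n):
--         if n%i ==1:
--             list_a.append(i)
--
--     if list_a and min(list_a) <=n-1:
--         answer = min(list_a)
--
--     else :
--         answer = n-1
--
--     return answer
-- ===== SOURCE B (Python) =====
-- def solution(n):
--     # smallest i>1 with n % i == 1 is the smallest divisor >= 2 of n-1,
--     # found by trial division up to sqrt(n-1); n-1 itself otherwise.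
--     m = n - 1
--     if m < 2:
--         return m
--     d = 2
--     while d * d <= m:
--         if m % d == 0:
--             return d
--         d += 1
--     return m
-- ===== Notes on version B (the rewrite author's own statement) =====
-- stated objective: faster
-- what changed: A scans every i in [1,n) testing n%i==1 and takes the min of the collected list; B notes that such i are exactly the divisors >=2 of n-1 and finds the smallest by trial division up to sqrt(n-1), returning n-1 when n-1 is prime or < 2.
import Mathlib
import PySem

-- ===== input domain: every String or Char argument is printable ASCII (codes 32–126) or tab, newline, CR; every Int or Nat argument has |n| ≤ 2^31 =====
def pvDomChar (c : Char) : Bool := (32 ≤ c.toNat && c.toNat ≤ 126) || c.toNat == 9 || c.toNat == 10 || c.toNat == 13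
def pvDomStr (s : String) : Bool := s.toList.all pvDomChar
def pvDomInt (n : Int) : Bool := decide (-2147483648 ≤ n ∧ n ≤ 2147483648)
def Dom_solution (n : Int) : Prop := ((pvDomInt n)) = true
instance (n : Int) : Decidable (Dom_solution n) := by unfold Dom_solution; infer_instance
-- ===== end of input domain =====

-- B replaces A's linear scan of [1,n) with trial division of n-1 up to its square root.

-- ===== PORT A =====
def solution (n : Int) : Int :=
  let list_a := (PySem.List.pyRange 1 n 1).foldl
    (fun acc i => if PySem.Int.mod n i = 1 then acc ++ [i] else acc) []
  match PySem.List.min? list_a (fun x => x) with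
  | some m => if m ≤ n - 1 then m else n - 1
  | none => n - 1

-- ===== PORT B =====
-- the `while d*d <= m` loop of Source B: return the first d with m % d == 0, else m
def trialDiv (m d : Int) : Int :=
  if h : d * d ≤ m then
    if PySem.Int.mod m d = 0 then d else trialDiv m (d + 1)
  else m
termination_by (m + 2 - d).toNat
decreasing_by
  have hd : d ≤ d * d := by
    by_cases h1 : 1 ≤ d
    · nlinarith
    · nlinarith
  have : d ≤ m := le_trans hd h
  omega

def solution_alt (n : Int) : Int :=
  let m := n - 1
  if m < 2 then m else trialDiv m 2

-- ===== PRECONDITION & SPEC =====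
def Spec_solution (n : Int) (out : Int) : Prop := out = solution_alt n
instance (n : Int) (out : Int) : Decidable (Spec_solution n out) := by unfold Spec_solution; infer_instance

-- ===== CLAIM (what is proved, stated in full; the proofs are below) =====
def Claim_equal_solution : Prop := ∀ (n : Int), Dom_solution n → Spec_solution n (solution n)

-- ===== LEMMAS AND PROOFS =====

-- the smallest divisor ≥ 2 of m, as an Int
def minFacI (m : Int) : Int := ((m.toNat.minFac : Nat) : Int)

lemma minFacI_facts (m : Int) (hm : 2 ≤ m) :
    2 ≤ minFacI m ∧ minFacI m ≤ m ∧ minFacI m ∣ m := by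
  unfold minFacI
  have hM : 2 ≤ m.toNat := by omega
  have hmm : ((m.toNat : Nat) : Int) = m := Int.toNat_of_nonneg (by omega)
  have h2 : 2 ≤ m.toNat.minFac := (Nat.minFac_prime (by omega)).two_le
  have hle : m.toNat.minFac ≤ m.toNat := Nat.minFac_le (by omega)
  have hdvd : m.toNat.minFac ∣ m.toNat := Nat.minFac_dvd _
  refine ⟨by exact_mod_cast h2, ?_, ?_⟩
  · calc ((m.toNat.minFac : Nat) : Int) ≤ ((m.toNat : Nat) : Int) := by exact_mod_cast hle
      _ = m := hmm
  · have : ((m.toNat.minFac : Nat) : Int) ∣ ((m.toNat : Nat) : Int) := Int.natCast_dvd_natCast.mpr hdvd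
    rwa [hmm] at this

lemma minFacI_min (m : Int) (hm : 2 ≤ m) (e : Int) (he : 2 ≤ e) (hd : e ∣ m) :
    minFacI m ≤ e := by
  unfold minFacI
  have hmm : ((m.toNat : Nat) : Int) = m := Int.toNat_of_nonneg (by omega)
  have hee : ((e.toNat : Nat) : Int) = e := Int.toNat_of_nonneg (by omega)
  have hdN : e.toNat ∣ m.toNat := by
    rw [← Int.natCast_dvd_natCast, hmm, hee]; exact hd
  have := Nat.minFac_le_of_dvd (by omega) hdN
  calc ((m.toNat.minFac : Nat) : Int) ≤ ((e.toNat : Nat) : Int) := by exact_mod_cast this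
    _ = e := hee

lemma foldl_min_of_le (x : Int) (t : List Int) (h : ∀ y ∈ t, x ≤ y) :
    t.foldl min x = x := by
  induction t with
  | nil => rfl
  | cons y t ih =>
      have hxy : min x y = x := min_eq_left (h y (by simp))
      simp only [List.foldl_cons, hxy]
      exact ih (fun z hz => h z (by simp [hz]))

lemma trialDiv_eq (m : Int) (hm : 2 ≤ m) :
    ∀ k (d : Int), (m + 2 - d).toNat = k → 2 ≤ d →
      (∀ e : Int, 2 ≤ e → e < d → ¬ e ∣ m) → trialDiv m d = minFacI m := by
  intro k
  induction k using Nat.strong_induction_on with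
  | _ k ih =>
    intro d hk hd hnd
    obtain ⟨hf2, hfle, hfdvd⟩ := minFacI_facts m hm
    rw [trialDiv]
    by_cases hsq : d * d ≤ m
    · rw [dif_pos hsq]
      by_cases hmod : PySem.Int.mod m d = 0
      · rw [if_pos hmod]
        have hddvd : d ∣ m := (PySem.Int.mod_eq_zero_iff_dvd m d).mp hmod
        have h1 : minFacI m ≤ d := minFacI_min m hm d hd hddvd
        have h2 : d ≤ minFacI m := by
          by_contra hlt
          exact hnd (minFacI m) hf2 (by omega) hfdvd
        omega
      · rw [if_neg hmod]
        have hdd : d ≤ d * d := by nlinarith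
        have hdm : d ≤ m := le_trans hdd hsq
        refine ih (m + 2 - (d + 1)).toNat (by omega) (d + 1) rfl (by omega) ?_
        intro e he2 helt
        rcases lt_or_eq_of_le (by omega : e ≤ d) with h | h
        · exact hnd e he2 h
        · subst h
          intro hdvd
          exact hmod ((PySem.Int.mod_eq_zero_iff_dvd m e).mpr hdvd)
    · rw [dif_neg hsq]
      -- m < d*d and no divisor in [2, d): the smallest divisor ≥ 2 of m is m itself
      by_contra hne
      have hflt : minFacI m < m := lt_of_le_of_ne hfle (fun h => hne h.symm)
      set f := minFacI m with hf
      obtain ⟨c, hc⟩ := hfdvd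
      have hcpos : 1 ≤ c := by nlinarith
      have hc2 : 2 ≤ c := by
        rcases lt_or_eq_of_le hcpos with h | h
        · omega
        · exfalso; rw [← h, mul_one] at hc; omega
      have hcdvd : c ∣ m := ⟨f, by rw [hc]; ring⟩
      have hfc : f ≤ c := minFacI_min m hm c hc2 hcdvd
      have hff : f * f ≤ m := by nlinarith
      have hfd : f < d := by nlinarith
      exact hnd f hf2 hfd ⟨c, hc⟩

lemma listA_mem (n i : Int) (_hn : 3 ≤ n) :
    (i ∈ (PySem.List.pyRange 1 n 1).filter (fun i => decide (PySem.Int.mod n i = 1)))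
      ↔ 2 ≤ i ∧ i ≤ n - 1 ∧ i ∣ (n - 1) := by
  rw [List.mem_filter, PySem.List.mem_pyRange_one]
  simp only [decide_eq_true_eq]
  constructor
  · rintro ⟨⟨h1, h2⟩, hmod⟩
    have hi2 : 2 ≤ i := by
      by_contra h
      have : i = 1 := by omega
      subst this
      simp at hmod
    rw [PySem.Int.mod_eq_emod_of_pos (by omega)] at hmod
    refine ⟨hi2, by omega, ?_⟩
    have := Int.mul_ediv_add_emod n i
    exact ⟨n / i, by omega⟩
  · rintro ⟨h1, h2, k, hk⟩
    have hrange : 1 ≤ i ∧ i < n := by omega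
    refine ⟨hrange, ?_⟩
    rw [PySem.Int.mod_eq_emod_of_pos (by omega)]
    have hn1 : n = 1 + i * k := by omega
    rw [hn1, Int.add_mul_emod_self_left]
    exact Int.emod_eq_of_lt (by omega) (by omega)

lemma minA_eq (n : Int) (hn : 3 ≤ n) :
    PySem.List.min? ((PySem.List.pyRange 1 n 1).filter
      (fun i => decide (PySem.Int.mod n i = 1))) (fun x => x) = some (minFacI (n - 1)) := by
  set L := (PySem.List.pyRange 1 n 1).filter (fun i => decide (PySem.Int.mod n i = 1)) with hL
  obtain ⟨hf2, hfle, hfdvd⟩ := minFacI_facts (n - 1) (by omega)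
  have hfmem : minFacI (n - 1) ∈ L := (listA_mem n _ hn).mpr ⟨hf2, hfle, hfdvd⟩
  have hmin : ∀ y ∈ L, minFacI (n - 1) ≤ y := by
    intro y hy
    obtain ⟨hy2, _, hydvd⟩ := (listA_mem n y hn).mp hy
    exact minFacI_min (n - 1) (by omega) y hy2 hydvd
  have hpw : L.Pairwise (· < ·) :=
    List.Pairwise.filter _ (PySem.List.pairwise_lt_pyRange_one 1 n)
  match hLc : L with
  | [] => simp at hfmem
  | a :: t =>
    have hat : ∀ y ∈ t, a < y := by
      intro y hy; exact (List.pairwise_cons.mp hpw).1 y hy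
    have hfa : minFacI (n - 1) = a := by
      rcases List.mem_cons.mp hfmem with h | h
      · exact h
      · have := hat _ h
        have := hmin a (by simp)
        omega
    rw [PySem.List.min?_id_cons, foldl_min_of_le a t (fun y hy => le_of_lt (hat y hy)), hfa]

-- ===== VERDICT (by name: the statement is the Claim_ definition above) =====
theorem solution_spec : Claim_equal_solution := by
  intro n _
  unfold Spec_solution
  rcases lt_trichotomy n 2 with hn | hn | hn
  · -- n ≤ 1: the range is empty, both return n - 1
    have h1 : n ≤ 1 := by omega
    simp only [solution, solution_alt, PySem.List.pyRange_one_eq_nil h1, List.foldl_nil]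
    simp [PySem.List.min?]
    intro h
    exact absurd h (by omega)
  · subst hn; decide
  · -- n ≥ 3
    have hn3 : 3 ≤ n := by omega
    have hm2 : 2 ≤ n - 1 := by omega
    obtain ⟨hf2, hfle, _⟩ := minFacI_facts (n - 1) hm2
    simp only [solution, solution_alt]
    rw [PySem.List.foldl_append_ite_eq_filter (fun i => PySem.Int.mod n i = 1), List.nil_append]
    rw [minA_eq n hn3]
    simp only
    rw [if_pos hfle, if_neg (by omega : ¬ n - 1 < 2)]
    exact (trialDiv_eq (n - 1) hm2 _ 2 rfl (by omega) (fun e he1 he2 _ => by omega)).symm
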